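-- pv_equiv track=rewrite | github.com/spiritTrance/dasanshang_homework | 1-NLP/wordDivision.py | forwardDivision
-- ===== SOURCE A (Python) =====
-- def forwardDivision(s: str, dic: set, maxSize: int = 10):       # 正向
--     l = 0
--     r = min(len(s), l + maxSize)
--     ans = []
--     while l < len(s) and r > 0:
--         sub_str = s[l: r]
--         if l == r - 1:
--             ans.append(sub_str)
--             l = r
--             r = min(len(s), l + maxSize)
--         elif sub_str in dic:
--             ans.append(sub_str)
--             l = r
--             r = min(len(s), l + maxSize)
--         else:
--             r -= 1
--     return ans
-- ===== SOURCE B (Python) =====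
-- def forwardDivision(s: str, dic: set, maxSize: int = 10):
--     # Scans the dictionary once per position for the longest word matching at l,
--     # instead of slicing windows of decreasing length and testing membership.
--     if maxSize <= 0:
--         return []
--     ans = []
--     l = 0
--     n = len(s)
--     while l < n:
--         window = min(maxSize, n - l)
--         best = 1
--         for w in dic:
--             if len(w) <= window and s.startswith(w, l):
--                 best = max(best, len(w))
--         ans.append(s[l:l + best])
--         l += best
--     return ans
-- ===== Notes on version B (the rewrite author's own statement) =====
-- stated objective: alternative
-- what changed: Instead of A's shrinking-window loop that slices s[l:r] for each candidate length and tests set membership, B scans the dictionary once per position with str.startswith to find the longest word matching there, then jumps ahead by that length (single character if none matches).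
import Mathlib
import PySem

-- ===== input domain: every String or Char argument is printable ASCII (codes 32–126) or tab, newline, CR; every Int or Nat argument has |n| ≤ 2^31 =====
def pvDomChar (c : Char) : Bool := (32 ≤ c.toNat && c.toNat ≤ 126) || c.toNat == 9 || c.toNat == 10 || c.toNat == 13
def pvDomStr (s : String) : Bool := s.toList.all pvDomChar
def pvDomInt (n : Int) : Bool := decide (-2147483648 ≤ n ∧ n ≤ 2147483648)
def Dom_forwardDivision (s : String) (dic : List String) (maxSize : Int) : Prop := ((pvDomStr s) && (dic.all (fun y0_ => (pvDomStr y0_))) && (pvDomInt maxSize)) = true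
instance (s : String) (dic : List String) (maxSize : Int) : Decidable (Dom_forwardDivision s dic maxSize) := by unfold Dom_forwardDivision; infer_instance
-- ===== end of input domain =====

-- B replaces A's shrinking-window scan (slice s[l:r], test set membership, shrink r) by a single
-- scan of the dictionary per position, taking the longest word that matches at l ('alternative').

-- ===== PORT A =====
-- A's while loop over the state (l, r, ans).  'l < r' in the dictionary branch is a pure
-- totality guard: it holds in every state the loop reaches (there the slice is nonempty).
def fdLoopA (cs : List Char) (dic : List String) (maxSize : Int) (l r : Int) (ans : List String) : List String :=
  if _h : l < (cs.length : Int) ∧ 0 < r then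
    if l = r - 1 then
      fdLoopA cs dic maxSize r (min (cs.length : Int) (r + maxSize))
        (ans ++ [String.ofList (PySem.List.slice cs (some l) (some r))])
    else if l < r ∧ String.ofList (PySem.List.slice cs (some l) (some r)) ∈ dic then
      fdLoopA cs dic maxSize r (min (cs.length : Int) (r + maxSize))
        (ans ++ [String.ofList (PySem.List.slice cs (some l) (some r))])
    else
      fdLoopA cs dic maxSize l (r - 1) ans
  else ans
termination_by (((cs.length : Int) - l).toNat, r.toNat)
decreasing_by
  · apply Prod.Lex.left; omega
  · apply Prod.Lex.left; omega
  · apply Prod.Lex.right; omega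

def forwardDivision (s : String) (dic : List String) (maxSize : Int) : List String :=
  fdLoopA s.toList dic maxSize 0 (min (s.toList.length : Int) (0 + maxSize)) []

-- ===== PORT B =====
-- the inner 'for w in dic' loop: running max of the lengths of dictionary words matching at l
-- (set iteration order is irrelevant: the result is a maximum).  s.startswith(w, l) is ported
-- by hand as w.toList.isPrefixOf (cs.drop l), exact for 0 ≤ l ≤ len(s).
def fdBest (cs : List Char) (dic : List String) (l window : Nat) : Nat :=
  dic.foldl (fun best w =>
    if w.toList.length ≤ window ∧ w.toList.isPrefixOf (cs.drop l) = true then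
      max best (w.toList.length)
    else best) 1

-- needed by fdLoopB's termination proof (the chunk taken each round is nonempty)
theorem le_fdBest_foldl (cs : List Char) (l window : Nat) (ds : List String) :
    ∀ init : Nat, init ≤ ds.foldl (fun best w =>
      if w.toList.length ≤ window ∧ w.toList.isPrefixOf (cs.drop l) = true then
        max best (w.toList.length)
      else best) init := by
  induction ds with
  | nil => simp
  | cons w t ih =>
    intro init
    simp only [List.foldl_cons]
    refine le_trans ?_ (ih _)
    split <;> omega

-- B's while loop; maxSize.toNat = maxSize here since fdLoopB is only called with 0 < maxSize.
def fdLoopB (cs : List Char) (dic : List String) (maxSize : Int) (l : Nat) (ans : List String) : List String :=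
  if _h : l < cs.length then
    let window := min maxSize.toNat (cs.length - l)
    let best := fdBest cs dic l window
    fdLoopB cs dic maxSize (l + best) (ans ++ [String.ofList ((cs.drop l).take best)])
  else ans
termination_by cs.length - l
decreasing_by
  have h1 := le_fdBest_foldl cs l (min maxSize.toNat (cs.length - l)) dic 1
  simp only [fdBest] at *
  omega

def forwardDivision_alt (s : String) (dic : List String) (maxSize : Int) : List String :=
  if maxSize ≤ 0 then [] else fdLoopB s.toList dic maxSize 0 []

-- ===== PRECONDITION & SPEC =====
def Spec_forwardDivision (s : String) (dic : List String) (maxSize : Int) (out : List String) : Prop := out = forwardDivision_alt s dic maxSize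
instance (s : String) (dic : List String) (maxSize : Int) (out : List String) : Decidable (Spec_forwardDivision s dic maxSize out) := by unfold Spec_forwardDivision; infer_instance

-- ===== CLAIM (what is proved, stated in full; the proofs are below) =====
def Claim_equal_forwardDivision : Prop := ∀ (s : String) (dic : List String) (maxSize : Int), Dom_forwardDivision s dic maxSize → Spec_forwardDivision s dic maxSize (forwardDivision s dic maxSize)

-- ===== LEMMAS AND PROOFS =====

theorem fdBest_pos (cs : List Char) (dic : List String) (l window : Nat) :
    1 ≤ fdBest cs dic l window := le_fdBest_foldl cs l window dic 1

-- the running max never exceeds the window (for a window ≥ 1)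
theorem fdBest_le (cs : List Char) (dic : List String) (l window : Nat) (hw : 1 ≤ window) :
    fdBest cs dic l window ≤ window := by
  have main : ∀ (ds : List String) (init : Nat), init ≤ window →
      ds.foldl (fun best w =>
        if w.toList.length ≤ window ∧ w.toList.isPrefixOf (cs.drop l) = true then
          max best (w.toList.length)
        else best) init ≤ window := by
    intro ds
    induction ds with
    | nil => intro init h; simpa using h
    | cons w t ih =>
      intro init h
      simp only [List.foldl_cons]
      refine ih _ ?_
      split <;> omega
  exact main dic 1 hw

-- every matching word's length is a lower bound for the running max
theorem fdBest_ge (cs : List Char) (dic : List String) (l window : Nat) (w : String)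
    (hw : w ∈ dic) (hlen : w.toList.length ≤ window)
    (hpre : w.toList.isPrefixOf (cs.drop l) = true) :
    w.toList.length ≤ fdBest cs dic l window := by
  have main : ∀ (ds : List String) (init : Nat), w ∈ ds →
      w.toList.length ≤ ds.foldl (fun best v =>
        if v.toList.length ≤ window ∧ v.toList.isPrefixOf (cs.drop l) = true then
          max best (v.toList.length)
        else best) init := by
    intro ds
    induction ds with
    | nil => intro init h; simp at h
    | cons v t ih =>
      intro init hmem
      simp only [List.foldl_cons]
      rcases List.mem_cons.mp hmem with rfl | hmem'
      · refine le_trans ?_ (le_fdBest_foldl cs l window t _)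
        rw [if_pos ⟨hlen, hpre⟩]
        exact le_max_right _ _
      · exact ih _ hmem'
  exact main dic 1 hw

-- if no dictionary word of length exactly window+1 matches, the window can shrink by one
theorem fdBest_congr (cs : List Char) (dic : List String) (l window : Nat)
    (h : ∀ w ∈ dic, w.toList.length = window + 1 → ¬ (w.toList.isPrefixOf (cs.drop l) = true)) :
    fdBest cs dic l (window + 1) = fdBest cs dic l window := by
  unfold fdBest
  apply PySem.List.foldl_congr_mem
  intro acc w hw
  by_cases hpre : w.toList.isPrefixOf (cs.drop l) = true
  · have hne : w.toList.length ≠ window + 1 := fun he => h w hw he hpre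
    by_cases hle : w.toList.length ≤ window
    · rw [if_pos ⟨by omega, hpre⟩, if_pos ⟨hle, hpre⟩]
    · have h1 : ¬ (w.toList.length ≤ window + 1 ∧ w.toList.isPrefixOf (cs.drop l) = true) := by
        rintro ⟨hc, -⟩; omega
      have h2 : ¬ (w.toList.length ≤ window ∧ w.toList.isPrefixOf (cs.drop l) = true) := by
        rintro ⟨hc, -⟩; omega
      rw [if_neg h1, if_neg h2]
  · rw [if_neg (fun hc => hpre hc.2), if_neg (fun hc => hpre hc.2)]

-- with window = 1 the single character is always taken
theorem fdBest_one (cs : List Char) (dic : List String) (l : Nat) :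
    fdBest cs dic l 1 = 1 := by
  have main : ∀ (ds : List String) (init : Nat), 1 ≤ init →
      ds.foldl (fun best w =>
        if w.toList.length ≤ 1 ∧ w.toList.isPrefixOf (cs.drop l) = true then
          max best (w.toList.length)
        else best) init = init := by
    intro ds
    induction ds with
    | nil => intro init _; simp
    | cons w t ih =>
      intro init h1
      simp only [List.foldl_cons]
      have : (if w.toList.length ≤ 1 ∧ w.toList.isPrefixOf (cs.drop l) = true then
          max init (w.toList.length) else init) = init := by
        split <;> omega
      rw [this]; exact ih _ h1
  exact main dic 1 le_rfl

-- "s[l:l+k] ∈ dic" is "some dictionary word of length k matches at l" (for k ≤ len - l)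
theorem slice_mem_iff (cs : List Char) (dic : List String) (l k : Nat) (hle : l + k ≤ cs.length) :
    String.ofList ((cs.drop l).take k) ∈ dic ↔
      ∃ w ∈ dic, w.toList.length = k ∧ w.toList.isPrefixOf (cs.drop l) = true := by
  constructor
  · intro hmem
    refine ⟨String.ofList ((cs.drop l).take k), hmem, ?_, ?_⟩
    · simp [String.toList_ofList]
      omega
    · rw [String.toList_ofList]
      exact List.isPrefixOf_iff_prefix.mpr (List.take_prefix k (cs.drop l))
  · rintro ⟨w, hw, hlen, hpre⟩
    have hp : w.toList <+: cs.drop l := List.isPrefixOf_iff_prefix.mp hpre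
    have : w.toList = (cs.drop l).take k := by
      have := List.prefix_iff_eq_take.mp hp
      rwa [show w.toList.length = k from hlen] at this
    rw [← this, String.ofList_toList]
    exact hw

-- A's inner descent of r from l+k down collapses to one jump by fdBest
theorem descend (cs : List Char) (dic : List String) (ms : Int) :
    ∀ (k l : Nat) (ans : List String), 1 ≤ k → l + k ≤ cs.length →
    fdLoopA cs dic ms (l : Int) ((l : Int) + (k : Int)) ans =
      fdLoopA cs dic ms ((l + fdBest cs dic l k : Nat) : Int)
        (min (cs.length : Int) (((l + fdBest cs dic l k : Nat) : Int) + ms))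
        (ans ++ [String.ofList ((cs.drop l).take (fdBest cs dic l k))]) := by
  intro k
  induction k with
  | zero => intro l ans hk; omega
  | succ n ih =>
    intro l ans _hk hle
    have hguard : (l : Int) < (cs.length : Int) ∧ 0 < (l : Int) + ((n + 1 : Nat) : Int) := by
      refine ⟨?_, ?_⟩
      · exact_mod_cast (by omega : l < cs.length)
      · push_cast; omega
    by_cases hn : n = 0
    · subst hn
      conv_lhs => rw [fdLoopA.eq_def]
      rw [dif_pos hguard, if_pos (by push_cast; ring)]
      rw [fdBest_one]
      have hsl : PySem.List.slice cs (some (l : Int)) (some ((l : Int) + ((1 : Nat) : Int))) =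
          (cs.drop l).take 1 := PySem.List.slice_natCast_add cs l 1
      rw [hsl]
      push_cast
      ring_nf
    · have hn1 : 1 ≤ n := by omega
      have hne : ¬ ((l : Int) = (l : Int) + ((n + 1 : Nat) : Int) - 1) := by push_cast; omega
      have hsl : PySem.List.slice cs (some (l : Int)) (some ((l : Int) + ((n + 1 : Nat) : Int))) =
          (cs.drop l).take (n + 1) := PySem.List.slice_natCast_add cs l (n + 1)
      by_cases hmem : String.ofList ((cs.drop l).take (n + 1)) ∈ dic
      · -- the full window is in the dictionary: A takes it, and fdBest = n+1
        have hbest : fdBest cs dic l (n + 1) = n + 1 := by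
          rcases (slice_mem_iff cs dic l (n + 1) hle).mp hmem with ⟨w, hw, hlen, hpre⟩
          have h1 := fdBest_ge cs dic l (n + 1) w hw (by omega) hpre
          have h2 := fdBest_le cs dic l (n + 1) (by omega)
          omega
        conv_lhs => rw [fdLoopA.eq_def]
        rw [dif_pos hguard, if_neg hne, if_pos ⟨by push_cast; omega, by rw [hsl]; exact hmem⟩]
        rw [hsl, hbest]
        push_cast
        ring_nf
      · -- not in the dictionary: r shrinks by one; recurse
        have hcongr : fdBest cs dic l (n + 1) = fdBest cs dic l n := by
          refine fdBest_congr cs dic l n ?_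
          intro w hw hlen hpre
          exact hmem ((slice_mem_iff cs dic l (n + 1) hle).mpr ⟨w, hw, hlen, hpre⟩)
        conv_lhs => rw [fdLoopA.eq_def]
        rw [dif_pos hguard, if_neg hne,
          if_neg (by rw [hsl]; rintro ⟨-, h⟩; exact hmem h)]
        have harg : (l : Int) + ((n + 1 : Nat) : Int) - 1 = (l : Int) + (n : Int) := by
          push_cast; ring
        rw [harg, ih l ans hn1 (by omega), hcongr]

-- the two loops agree, position by position
theorem outer (cs : List Char) (dic : List String) (ms : Int) (hms : 1 ≤ ms) :
    ∀ (n l : Nat) (ans : List String), cs.length ≤ l + n →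
    fdLoopA cs dic ms (l : Int) (min (cs.length : Int) ((l : Int) + ms)) ans =
      fdLoopB cs dic ms l ans := by
  intro n
  induction n with
  | zero =>
    intro l ans h
    rw [fdLoopA.eq_def, fdLoopB.eq_def]
    rw [dif_neg (by omega), dif_neg (by omega)]
  | succ n ih =>
    intro l ans h
    by_cases hl : l < cs.length
    · have hk1 : 1 ≤ min ms.toNat (cs.length - l) := by omega
      have hr : min (cs.length : Int) ((l : Int) + ms) =
          (l : Int) + ((min ms.toNat (cs.length - l) : Nat) : Int) := by push_cast; omega
      rw [hr, descend cs dic ms (min ms.toNat (cs.length - l)) l ans hk1 (by omega)]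
      conv_rhs => rw [fdLoopB.eq_def]
      rw [dif_pos hl]
      simp only []
      exact ih (l + fdBest cs dic l (min ms.toNat (cs.length - l))) _
        (by have := fdBest_pos cs dic l (min ms.toNat (cs.length - l)); omega)
    · rw [fdLoopA.eq_def, fdLoopB.eq_def]
      rw [dif_neg (by omega), dif_neg (by omega)]

-- ===== VERDICT (by name: the statement is the Claim_ definition above) =====
theorem forwardDivision_spec : Claim_equal_forwardDivision := by
  intro s dic ms _dom
  unfold Spec_forwardDivision forwardDivision forwardDivision_alt
  by_cases hms : ms ≤ 0
  · rw [if_pos hms, fdLoopA.eq_def, dif_neg (by omega)]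
  · rw [if_neg hms]
    have h0 : (0 : Int) = ((0 : Nat) : Int) := rfl
    rw [zero_add, show (min (s.toList.length : Int) ms) =
        (min (s.toList.length : Int) (((0 : Nat) : Int) + ms)) by push_cast; ring_nf]
    exact outer s.toList dic ms (by omega) s.toList.length 0 [] (by omega)
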